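-- pv_equiv track=rewrite | github.com/mgytr/cOS | applications/textedit.py | re_tab
-- ===== SOURCE A (Python) =====
-- def re_tab(s):
--     line = []
--     p = 0
--     for i in range(8, len(s), 8):
--         if s[i - 2 : i] == '  ':
--
--             line.append(f'{s[p:i].rstrip()}\t')
--             p = i
--
--     if p == 0:
--         return s
--
--     line.append(s[p:])
--     return ''.join(line)
-- ===== SOURCE B (Python) =====
-- def _prev_break(s, j):
--     while j >= 8 and s[j - 2:j] != '  ':
--         j -= 8
--     return j
--
-- def _conv(s, k):
--     j = _prev_break(s, k - 8)
--     if j >= 8: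
--         return _conv(s, j) + s[j:k].rstrip() + '\t'
--     return s[0:k].rstrip() + '\t'
--
-- def re_tab(s):
--     k = _prev_break(s, ((len(s) - 1) // 8) * 8)
--     if k < 8:
--         return s
--     return _conv(s, k) + s[k:]
-- ===== Notes on version B (the rewrite author's own statement) =====
-- stated objective: alternative
-- what changed: A scans forward left-to-right with a single accumulator loop carrying (pieces, p); B works back-to-front: it searches downward in steps of 8 for the last qualifying break and renders the converted prefix by recursion, each call locating the previous break below it.
import Mathlib
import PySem

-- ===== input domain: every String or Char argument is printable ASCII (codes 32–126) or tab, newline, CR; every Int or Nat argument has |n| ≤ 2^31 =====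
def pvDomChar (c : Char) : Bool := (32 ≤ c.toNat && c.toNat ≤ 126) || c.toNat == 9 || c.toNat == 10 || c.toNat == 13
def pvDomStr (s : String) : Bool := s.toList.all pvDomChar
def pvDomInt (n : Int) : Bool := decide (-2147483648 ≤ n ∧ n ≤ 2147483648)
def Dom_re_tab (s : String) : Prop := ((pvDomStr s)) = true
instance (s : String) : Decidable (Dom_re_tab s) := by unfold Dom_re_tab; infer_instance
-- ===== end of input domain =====

-- B replaces A's forward accumulator loop with back-to-front recursion: it searches downward
-- for the last qualifying break and emits the text recursively (objective: alternative, same cost).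

-- ===== PORT A =====
-- single forward loop carrying (emitted pieces, p); returns s unchanged when p stayed 0
def re_tab (s : String) : String :=
  let cs := s.toList
  let st := (PySem.List.pyRange 8 (cs.length : Int) 8).foldl
    (fun (st : List (List Char) × Int) i =>
      if PySem.List.slice cs (some (i - 2)) (some i) = [' ', ' '] then
        (st.1 ++ [PySem.Chars.rstrip (PySem.List.slice cs (some st.2) (some i)) ++ ['\t']], i)
      else st) ([], 0)
  if st.2 = 0 then s
  else String.ofList ((st.1 ++ [PySem.List.slice cs (some st.2) none]).flatten)

-- ===== PORT B =====
-- `_prev_break`: walk downward in steps of 8 until a qualifying break (or below 8) is found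
def prevBreak (cs : List Char) (j : Int) : Int :=
  if h : 8 ≤ j then
    if PySem.List.slice cs (some (j - 2)) (some j) = [' ', ' '] then j
    else prevBreak cs (j - 8)
  else j
termination_by j.toNat
decreasing_by omega

-- needed only so that `conv`'s recursion is seen to terminate
theorem prevBreak_le (cs : List Char) (j : Int) : prevBreak cs j ≤ j := by
  fun_induction prevBreak cs j <;> omega

-- `_conv`: recursively render everything up to break k (back-to-front), ending in a tab
def conv (cs : List Char) (k : Int) : List Char :=
  let j := prevBreak cs (k - 8)
  if h : 8 ≤ j then
    conv cs j ++ (PySem.Chars.rstrip (PySem.List.slice cs (some j) (some k)) ++ ['\t'])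
  else
    PySem.Chars.rstrip (PySem.List.slice cs (some 0) (some k)) ++ ['\t']
termination_by k.toNat
decreasing_by
  have := prevBreak_le cs (k - 8); omega

def re_tab_alt (s : String) : String :=
  let cs := s.toList
  let k := prevBreak cs (PySem.Int.floordiv ((cs.length : Int) - 1) 8 * 8)
  if k < 8 then s
  else String.ofList (conv cs k ++ PySem.List.slice cs (some k) none)

-- ===== PRECONDITION & SPEC =====
def Spec_re_tab (s : String) (out : String) : Prop := out = re_tab_alt s
instance (s : String) (out : String) : Decidable (Spec_re_tab s out) := by unfold Spec_re_tab; infer_instance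

-- ===== CLAIM (what is proved, stated in full; the proofs are below) =====
def Claim_equal_re_tab : Prop := ∀ (s : String), Dom_re_tab s → Spec_re_tab s (re_tab s)

-- ===== LEMMAS AND PROOFS =====

-- the break condition and A's loop body, named
def pvC (cs : List Char) (i : Int) : Bool :=
  decide (PySem.List.slice cs (some (i - 2)) (some i) = [' ', ' '])

def pvF (cs : List Char) (st : List (List Char) × Int) (i : Int) : List (List Char) × Int :=
  (st.1 ++ [PySem.Chars.rstrip (PySem.List.slice cs (some st.2) (some i)) ++ ['\t']], i)

-- the candidate breaks 8, 16, …, 8m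
def pvR (m : Nat) : List Int := (List.range m).map (fun (k : Nat) => (8 : Int) + 8 * (k : Int))

-- A's guarded fold equals the fold over the filtered list
theorem pv_foldl_if_filter {α β : Type} (c : β → Bool) (f : α → β → α) :
    ∀ (l : List β) (init : α),
      l.foldl (fun acc i => if c i = true then f acc i else acc) init
        = (l.filter c).foldl f init := by
  intro l
  induction l with
  | nil => intro init; rfl
  | cons a l ih =>
    intro init
    by_cases h : c a = true
    · simp [List.foldl, List.filter, h, ih]
    · simp [List.foldl, List.filter, h, ih]

theorem prevBreak_unfold (cs : List Char) (j : Int) :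
    prevBreak cs j =
      if 8 ≤ j then (if pvC cs j = true then j else prevBreak cs (j - 8)) else j := by
  rw [prevBreak]
  simp [pvC]

theorem conv_unfold (cs : List Char) (k : Int) :
    conv cs k =
      if 8 ≤ prevBreak cs (k - 8) then
        conv cs (prevBreak cs (k - 8)) ++
          (PySem.Chars.rstrip (PySem.List.slice cs (some (prevBreak cs (k - 8))) (some k)) ++ ['\t'])
      else
        PySem.Chars.rstrip (PySem.List.slice cs (some 0) (some k)) ++ ['\t'] := by
  rw [conv]
  by_cases h : (8 : Int) ≤ prevBreak cs (k - 8) <;> simp [h]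

-- the heart: over candidates 8..8m, B's downward search + recursion matches A's forward fold
theorem pv_main (cs : List Char) (m : Nat) :
    match ((pvR m).filter (pvC cs)).getLast? with
    | none => prevBreak cs (8 * (m : Int)) < 8
    | some k =>
        prevBreak cs (8 * (m : Int)) = k ∧ 8 ≤ k ∧
        conv cs k = (((pvR m).filter (pvC cs)).foldl (pvF cs) ([], 0)).1.flatten ∧
        (((pvR m).filter (pvC cs)).foldl (pvF cs) ([], 0)).2 = k := by
  induction m with
  | zero =>
    simp only [pvR, List.range_zero, List.map_nil, List.filter_nil, List.getLast?_nil]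
    have h0 : (8 : Int) * ((0 : Nat) : Int) = 0 := by norm_num
    rw [h0, prevBreak_unfold]
    norm_num
  | succ m ih =>
    have hR : pvR (m + 1) = pvR m ++ [8 + 8 * (m : Int)] := by
      simp [pvR, List.range_succ]
    have hcast : ((m + 1 : Nat) : Int) = (m : Int) + 1 := by push_cast; ring
    have hx : (8 : Int) * ((m : Int) + 1) = 8 + 8 * (m : Int) := by ring
    have h8 : (8 : Int) ≤ 8 + 8 * (m : Int) := by omega
    have hj : (8 : Int) + 8 * (m : Int) - 8 = 8 * (m : Int) := by ring
    rw [hcast, hR, hx, List.filter_append]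
    by_cases hc : pvC cs (8 + 8 * (m : Int)) = true
    · -- 8(m+1) is itself a qualifying break
      have hpb : prevBreak cs (8 + 8 * (m : Int)) = 8 + 8 * (m : Int) := by
        rw [prevBreak_unfold, if_pos h8, if_pos hc]
      simp only [List.filter_cons, List.filter_nil, hc, if_pos]
      rw [List.getLast?_concat, List.foldl_append]
      refine ⟨hpb, h8, ?_, by simp [pvF]⟩
      rw [conv_unfold, hj]
      cases hL : ((pvR m).filter (pvC cs)).getLast? with
      | none =>
        have hnil : (pvR m).filter (pvC cs) = [] := List.getLast?_eq_none_iff.mp hL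
        rw [hL] at ih
        rw [if_neg (by omega : ¬ (8 : Int) ≤ prevBreak cs (8 * (m : Int))), hnil]
        simp [pvF]
      | some j =>
        rw [hL] at ih
        obtain ⟨h1, h2, h3, h4⟩ := ih
        rw [h1, if_pos h2]
        simp [pvF, h3, h4]
    · -- 8(m+1) is not a break: everything reduces to m
      have hpb : prevBreak cs (8 + 8 * (m : Int)) = prevBreak cs (8 * (m : Int)) := by
        rw [prevBreak_unfold, if_pos h8, if_neg hc, hj]
      simp only [List.filter_cons, List.filter_nil, hc]
      rw [hpb]
      simpa using ih

theorem re_tab_eq_alt (s : String) : re_tab s = re_tab_alt s := by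
  unfold re_tab re_tab_alt
  dsimp only
  set cs := s.toList with hcs
  have hguard : (fun (st : List (List Char) × Int) (i : Int) =>
      if PySem.List.slice cs (some (i - 2)) (some i) = [' ', ' '] then
        (st.1 ++ [PySem.Chars.rstrip (PySem.List.slice cs (some st.2) (some i)) ++ ['\t']], i)
      else st)
      = (fun (st : List (List Char) × Int) (i : Int) =>
          if pvC cs i = true then pvF cs st i else st) := by
    funext st i
    simp [pvC, pvF]
  rcases Nat.eq_zero_or_pos cs.length with hn | hn
  · -- empty string: both sides return s
    have hr : PySem.List.pyRange 8 (cs.length : Int) 8 = [] := by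
      rw [PySem.List.pyRange_of_pos _ _ (by norm_num : (0:Int) < 8)]
      have hlt : ¬ ((8:Int) < (cs.length : Int)) := by omega
      simp [hlt]
    have hfd : PySem.Int.floordiv ((cs.length : Int) - 1) 8 * 8 = -8 := by
      simp only [PySem.Int.floordiv, Int.fdiv_eq_ediv]
      omega
    rw [hr, hfd, prevBreak_unfold]
    norm_num
  · -- nonempty string
    set m : Nat := (cs.length - 1) / 8 with hm
    have hfd : PySem.Int.floordiv ((cs.length : Int) - 1) 8 * 8 = 8 * (m : Int) := by
      simp only [PySem.Int.floordiv, Int.fdiv_eq_ediv, hm]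
      omega
    have hpr : PySem.List.pyRange 8 (cs.length : Int) 8 = pvR m := by
      rw [PySem.List.pyRange_of_pos _ _ (by norm_num : (0:Int) < 8)]
      have hcount : (if (8:Int) < (cs.length : Int)
          then (((cs.length : Int) - 8 + 8 - 1) / 8).toNat else 0) = m := by
        split_ifs with h8 <;> omega
      rw [hcount]
      simp [pvR]
    rw [hpr, hfd, hguard, pv_foldl_if_filter (pvC cs) (pvF cs)]
    have hmain := pv_main cs m
    cases hL : ((pvR m).filter (pvC cs)).getLast? with
    | none =>
      have hnil : (pvR m).filter (pvC cs) = [] := List.getLast?_eq_none_iff.mp hL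
      rw [hL] at hmain
      have hlt : prevBreak cs (8 * (m : Int)) < 8 := hmain
      rw [hnil]
      simp [hlt]
    | some k =>
      rw [hL] at hmain
      obtain ⟨h1, h2, h3, h4⟩ := hmain
      rw [h4, h1, if_neg (by omega : ¬ k = 0), if_neg (by omega : ¬ k < 8)]
      congr 1
      rw [h3]
      simp [List.flatten_append]

-- ===== VERDICT (by name: the statement is the Claim_ definition above) =====
theorem re_tab_spec : Claim_equal_re_tab := by
  intro s _
  unfold Spec_re_tab
  exact re_tab_eq_alt s
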